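-- pv_equiv track=rewrite | github.com/OnyxALeroy/OL-Grammar-Analyser | src/parser.py | _tokenize_alternative
-- ===== SOURCE A (Python) =====
-- from typing import Dict, List, Optional, Union
--
-- def _tokenize_alternative(alternative: str) -> List[str]:
--     tokens = []
--     current_token = ""
--     in_non_terminal = False
--
--     i = 0
--     while i < len(alternative):
--         char = alternative[i]
--
--         if char == '<':
--             if current_token.strip():
--                 tokens.append(current_token.strip())
--                 current_token = ""
--             in_non_terminal = True
--             current_token += char
--         elif char == '>':
--             current_token += char
--             if in_non_terminal:
--                 tokens.append(current_token.strip())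
--                 current_token = ""
--                 in_non_terminal = False
--         elif char in ['*', '+'] and not in_non_terminal:
--             if current_token.strip():
--                 tokens.append(current_token.strip())
--                 current_token = ""
--             tokens.append(char)
--         elif char.isspace() and not in_non_terminal:
--             if current_token.strip():
--                 tokens.append(current_token.strip())
--                 current_token = ""
--         else:
--             current_token += char
--         i += 1
--
--     if current_token.strip():
--         tokens.append(current_token.strip())
--
--     return tokens
-- ===== SOURCE B (Python) =====
-- def _tokenize_alternative(alternative: str) -> list:
--     # Position-based scanner: maximal-munch chunks instead of a char state machine.
--     tokens = []
--     n = len(alternative)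
--     i = 0
--     while i < n:
--         c = alternative[i]
--         if c.isspace():
--             i += 1
--         elif c in '*+':
--             tokens.append(c)
--             i += 1
--         elif c == '<':
--             j = i + 1
--             while j < n and alternative[j] != '<' and alternative[j] != '>':
--                 j += 1
--             if j < n and alternative[j] == '>':
--                 tokens.append(alternative[i:j + 1])
--                 i = j + 1
--             else:
--                 tokens.append(alternative[i:j].strip())
--                 i = j
--         else:
--             j = i + 1
--             while j < n and alternative[j] != '<' and alternative[j] not in '*+' and not alternative[j].isspace():
--                 j += 1
--             tokens.append(alternative[i:j])
--             i = j
--     return tokens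
-- ===== Notes on version B (the rewrite author's own statement) =====
-- stated objective: faster
-- what changed: Replaced the char-by-char state machine (in_non_terminal flag + growing current_token accumulator) with a position-based maximal-munch scanner that finds each token's end with an inner scan and emits it as one slice, so no per-character string accumulation or flag state is kept.
import Mathlib
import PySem

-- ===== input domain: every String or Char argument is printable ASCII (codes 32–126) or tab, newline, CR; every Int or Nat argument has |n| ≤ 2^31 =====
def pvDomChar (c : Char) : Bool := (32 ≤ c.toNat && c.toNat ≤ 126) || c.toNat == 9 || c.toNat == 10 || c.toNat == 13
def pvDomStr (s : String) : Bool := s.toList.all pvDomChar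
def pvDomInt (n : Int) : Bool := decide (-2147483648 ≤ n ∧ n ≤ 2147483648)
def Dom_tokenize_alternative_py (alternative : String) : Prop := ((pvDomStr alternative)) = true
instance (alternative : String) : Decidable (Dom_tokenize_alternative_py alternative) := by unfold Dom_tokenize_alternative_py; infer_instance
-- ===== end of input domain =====

-- B replaces A's char-by-char state machine by a position-based maximal-munch scanner
-- that emits each token as one slice, avoiding per-character string accumulation (measured faster).

-- ===== PORT A =====
-- one iteration of A's while loop: state = (tokens, current_token, in_non_terminal)
def tokStepA (st : List String × List Char × Bool) (c : Char) :
    List String × List Char × Bool :=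
  let tokens := st.1
  let current := st.2.1
  let inNT := st.2.2
  if c = '<' then
    let tokens := if PySem.Chars.strip current ≠ [] then
        tokens ++ [String.ofList (PySem.Chars.strip current)] else tokens
    (tokens, [] ++ [c], true)
  else if c = '>' then
    let current := current ++ [c]
    if inNT then
      (tokens ++ [String.ofList (PySem.Chars.strip current)], [], false)
    else (tokens, current, inNT)
  else if (c = '*' ∨ c = '+') ∧ inNT = false then
    let tokens := if PySem.Chars.strip current ≠ [] then
        tokens ++ [String.ofList (PySem.Chars.strip current)] else tokens
    (tokens ++ [String.ofList [c]], [], inNT)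
  else if PySem.Chars.isspace c = true ∧ inNT = false then
    ((if PySem.Chars.strip current ≠ [] then
        tokens ++ [String.ofList (PySem.Chars.strip current)] else tokens), [], inNT)
  else
    (tokens, current ++ [c], inNT)

-- the flush after the loop
def tokFinishA (st : List String × List Char × Bool) : List String :=
  if PySem.Chars.strip st.2.1 ≠ [] then
    st.1 ++ [String.ofList (PySem.Chars.strip st.2.1)]
  else st.1

def tokenize_alternative_py (alternative : String) : List String :=
  tokFinishA (alternative.toList.foldl tokStepA ([], [], false))

-- ===== PORT B =====
-- chars that may continue a plain word (B's inner word scan condition)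
def tokWordPred (c : Char) : Bool :=
  !(c == '<' || c == '*' || c == '+' || PySem.Chars.isspace c)

-- chars that may continue the body of a non-terminal (B's inner '<' scan condition)
def tokNtPred (c : Char) : Bool := !(c == '<' || c == '>')

def tokB : List Char → List String
  | [] => []
  | c :: rest =>
    if PySem.Chars.isspace c then tokB rest
    else if c == '*' || c == '+' then String.ofList [c] :: tokB rest
    else if c == '<' then
      -- scan for the end of the non-terminal: the next '>' or '<' or the end
      let body := rest.takeWhile tokNtPred
      let rest' := rest.dropWhile tokNtPred
      if rest'.head? = some '>' then
        String.ofList ('<' :: (body ++ ['>'])) :: tokB rest'.tail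
      else
        String.ofList (PySem.Chars.strip ('<' :: body)) :: tokB rest'
    else
      -- scan for the end of the word
      String.ofList (c :: rest.takeWhile tokWordPred) :: tokB (rest.dropWhile tokWordPred)
termination_by l => l.length
decreasing_by
  · simp
  · simp
  · have h1 := List.length_dropWhile_le tokNtPred rest
    have h2 : (rest.dropWhile tokNtPred).tail.length ≤ (rest.dropWhile tokNtPred).length := by
      cases rest.dropWhile tokNtPred <;> simp
    simp only [List.length_cons]
    omega
  · have h1 := List.length_dropWhile_le tokNtPred rest
    simp only [List.length_cons]
    omega
  · have h1 := List.length_dropWhile_le tokWordPred rest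
    simp only [List.length_cons]
    omega

def tokenize_alternative_py_alt (alternative : String) : List String :=
  tokB alternative.toList

-- ===== PRECONDITION & SPEC =====
def Spec_tokenize_alternative_py (alternative : String) (out : List String) : Prop := out = tokenize_alternative_py_alt alternative
instance (alternative : String) (out : List String) : Decidable (Spec_tokenize_alternative_py alternative out) := by unfold Spec_tokenize_alternative_py; infer_instance

-- ===== CLAIM (what is proved, stated in full; the proofs are below) =====
def Claim_equal_tokenize_alternative_py : Prop := ∀ (alternative : String), Dom_tokenize_alternative_py alternative → Spec_tokenize_alternative_py alternative (tokenize_alternative_py alternative)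

-- ===== LEMMAS AND PROOFS =====

-- the tokens B still produces when A is mid-way through a non-terminal whose
-- accumulated text so far is `pre` and the remaining input is `l`
def contNT (pre : List Char) (l : List Char) : List String :=
  if (l.dropWhile tokNtPred).head? = some '>' then
    String.ofList (pre ++ (l.takeWhile tokNtPred ++ ['>'])) :: tokB (l.dropWhile tokNtPred).tail
  else
    String.ofList (PySem.Chars.strip (pre ++ l.takeWhile tokNtPred)) :: tokB (l.dropWhile tokNtPred)

@[simp] lemma strip_nil : PySem.Chars.strip [] = [] := rfl

lemma strip_of_no_space {w : List Char} (h : ∀ c ∈ w, PySem.Chars.isspace c = false) :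
    PySem.Chars.strip w = w := by
  have hd : ∀ v : List Char, (∀ c ∈ v, PySem.Chars.isspace c = false) →
      v.dropWhile PySem.Chars.isspace = v := by
    intro v hv
    cases v with
    | nil => rfl
    | cons a t => simp [hv a (by simp)]
  simp [PySem.Chars.strip, PySem.Chars.lstrip, PySem.Chars.rstrip, hd w h]
  rw [hd _ (by intro c hc; exact h c (by simpa using hc))]
  simp

lemma strip_sandwich {a z : Char} {m : List Char}
    (ha : PySem.Chars.isspace a = false) (hz : PySem.Chars.isspace z = false) :
    PySem.Chars.strip (a :: (m ++ [z])) = a :: (m ++ [z]) := by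
  simp [PySem.Chars.strip, PySem.Chars.lstrip, PySem.Chars.rstrip,
    ha, hz]

lemma strip_lt_ne_nil (b : List Char) : PySem.Chars.strip ('<' :: b) ≠ [] := by
  have hlt : PySem.Chars.isspace '<' = false := by decide
  simp only [PySem.Chars.strip, PySem.Chars.lstrip, PySem.Chars.rstrip]
  rw [List.dropWhile_cons]
  simp [hlt, List.dropWhile_eq_nil_iff]
  exact ⟨'<', Or.inr rfl, by simp [hlt]⟩

lemma tokB_lt (r : List Char) : tokB ('<' :: r) = contNT ['<'] r := by
  rw [tokB, contNT]
  simp [show PySem.Chars.isspace '<' = false from by decide]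

lemma tokB_space {c : Char} (h : PySem.Chars.isspace c = true) (r : List Char) :
    tokB (c :: r) = tokB r := by
  rw [tokB]; simp [h]

lemma tokB_op {c : Char} (h : c = '*' ∨ c = '+') (r : List Char) :
    tokB (c :: r) = String.ofList [c] :: tokB r := by
  rcases h with h | h <;> subst h <;> rw [tokB] <;>
    simp [show PySem.Chars.isspace '*' = false from by decide,
      show PySem.Chars.isspace '+' = false from by decide]

lemma tokB_word {c : Char} (h : tokWordPred c = true) (r : List Char) :
    tokB (c :: r) = String.ofList (c :: r.takeWhile tokWordPred) ::
      tokB (r.dropWhile tokWordPred) := by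
  rw [tokB]
  simp only [tokWordPred, Bool.not_eq_eq_eq_not, Bool.not_true, Bool.or_eq_false_iff] at h
  obtain ⟨⟨⟨h1, h2⟩, h3⟩, h4⟩ := h
  simp_all

lemma contNT_nt {c : Char} (h : tokNtPred c = true) (pre r : List Char) :
    contNT pre (c :: r) = contNT (pre ++ [c]) r := by
  simp only [contNT, List.dropWhile_cons, List.takeWhile_cons, h]
  split <;> simp_all

lemma contNT_gt (pre r : List Char) :
    contNT pre ('>' :: r) = String.ofList (pre ++ ['>']) :: tokB r := by
  have h : tokNtPred '>' = false := by decide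
  simp [contNT, h]

lemma contNT_lt (pre r : List Char) :
    contNT pre ('<' :: r) =
      String.ofList (PySem.Chars.strip pre) :: tokB ('<' :: r) := by
  have h : tokNtPred '<' = false := by decide
  simp [contNT, h]

lemma wordPred_no_space {c : Char} (h : tokWordPred c = true) :
    PySem.Chars.isspace c = false := by
  simp only [tokWordPred, Bool.not_eq_eq_eq_not, Bool.not_true, Bool.or_eq_false_iff] at h
  exact h.2

-- the loop invariant: A's fold, flushed, equals the emitted tokens plus B's
-- tokenization of the rest, in both machine modes
lemma foldA_spec (l : List Char) :
    (∀ (tokens : List String) (cur : List Char),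
      (∀ c ∈ cur, tokWordPred c = true) →
      tokFinishA (l.foldl tokStepA (tokens, cur, false)) =
        tokens ++ (if cur = [] then tokB l
          else String.ofList (cur ++ l.takeWhile tokWordPred) ::
            tokB (l.dropWhile tokWordPred)))
    ∧
    (∀ (tokens : List String) (body : List Char),
      (∀ c ∈ body, tokNtPred c = true) →
      tokFinishA (l.foldl tokStepA (tokens, '<' :: body, true)) =
        tokens ++ contNT ('<' :: body) l) := by
  induction l with
  | nil =>
    constructor
    · intro tokens cur hcur
      have hs : PySem.Chars.strip cur = cur :=
        strip_of_no_space (fun c hc => wordPred_no_space (hcur c hc))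
      by_cases hc : cur = []
      · subst hc; simp [tokFinishA, tokB]
      · simp [tokFinishA, hs, hc, tokB]
    · intro tokens body hbody
      have hne := strip_lt_ne_nil body
      simp [tokFinishA, hne, contNT, tokB]
  | cons c r ih =>
    obtain ⟨ihW, ihN⟩ := ih
    constructor
    · -- word mode
      intro tokens cur hcur
      have hs : PySem.Chars.strip cur = cur :=
        strip_of_no_space (fun c hc => wordPred_no_space (hcur c hc))
      rw [List.foldl_cons]
      by_cases hlt : c = '<'
      · subst hlt
        have step : tokStepA (tokens, cur, false) '<' =
            ((if PySem.Chars.strip cur ≠ [] then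
                tokens ++ [String.ofList (PySem.Chars.strip cur)] else tokens),
              ['<'], true) := by simp [tokStepA]
        rw [step, ihN _ [] (by simp)]
        by_cases hc : cur = []
        · subst hc; simp [tokB_lt]
        · have hpred : tokWordPred '<' = false := by decide
          simp [hs, hc, hpred, tokB_lt]
      · by_cases hw : tokWordPred c = true
        · -- word char ('>' included): both A-branches append c to cur
          have step : tokStepA (tokens, cur, false) c = (tokens, cur ++ [c], false) := by
            have h1 : c ≠ '*' := by
              intro h; subst h; exact absurd hw (by decide)
            have h2 : c ≠ '+' := by
              intro h; subst h; exact absurd hw (by decide)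
            have h4 : PySem.Chars.isspace c = false := wordPred_no_space hw
            by_cases hgt : c = '>'
            · subst hgt; simp [tokStepA]
            · simp [tokStepA, hlt, hgt, h1, h2, h4]
          have hcur' : ∀ d ∈ cur ++ [c], tokWordPred d = true := by
            intro d hd
            rcases List.mem_append.1 hd with hd | hd
            · exact hcur d hd
            · simp at hd; subst hd; exact hw
          rw [step, ihW _ _ hcur']
          have hne : cur ++ [c] ≠ [] := by simp
          by_cases hc : cur = []
          · subst hc
            simp [tokB_word hw]
          · simp [hne, hc, hw]
        · -- separator other than '<': whitespace or an operator
          have hgt : c ≠ '>' := by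
            intro h; subst h; exact hw (by decide)
          by_cases hsp : PySem.Chars.isspace c = true
          · -- whitespace
            have h1 : c ≠ '*' := by intro h; subst h; exact absurd hsp (by decide)
            have h2 : c ≠ '+' := by intro h; subst h; exact absurd hsp (by decide)
            have step : tokStepA (tokens, cur, false) c =
                ((if PySem.Chars.strip cur ≠ [] then
                    tokens ++ [String.ofList (PySem.Chars.strip cur)] else tokens),
                  [], false) := by
              simp [tokStepA, hlt, hgt, h1, h2, hsp]
            rw [step, ihW _ [] (by simp)]
            have hpred : tokWordPred c = false := by simp [tokWordPred, hsp]
            by_cases hc : cur = []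
            · subst hc; simp [tokB_space hsp]
            · simp [hs, hc, hpred,
                tokB_space hsp]
          · -- operator: tokWordPred c = false, c ∉ {<,>}, not whitespace ⇒ c ∈ {*,+}
            have hop : c = '*' ∨ c = '+' := by
              by_cases h1 : c = '*'
              · exact Or.inl h1
              by_cases h2 : c = '+'
              · exact Or.inr h2
              exfalso
              apply hw
              have hspf : PySem.Chars.isspace c = false := by simpa using hsp
              simp [tokWordPred, hlt, h1, h2, hspf]
            have step : tokStepA (tokens, cur, false) c =
                ((if PySem.Chars.strip cur ≠ [] then
                    tokens ++ [String.ofList (PySem.Chars.strip cur)] else tokens)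
                  ++ [String.ofList [c]], [], false) := by
              rcases hop with h | h <;> subst h <;> simp [tokStepA]
            rw [step, ihW _ [] (by simp)]
            have hpred : tokWordPred c = false := by
              rcases hop with h | h <;> subst h <;> decide
            by_cases hc : cur = []
            · subst hc; simp [tokB_op hop]
            · simp [hs, hc, hpred,
                tokB_op hop]
    · -- non-terminal mode
      intro tokens body hbody
      rw [List.foldl_cons]
      by_cases hlt : c = '<'
      · subst hlt
        have hne := strip_lt_ne_nil body
        have step : tokStepA (tokens, '<' :: body, true) '<' =
            (tokens ++ [String.ofList (PySem.Chars.strip ('<' :: body))], ['<'], true) := by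
          simp [tokStepA, hne]
        rw [step, ihN _ [] (by simp), contNT_lt, tokB_lt]
        simp
      · by_cases hgt : c = '>'
        · subst hgt
          have hsand : PySem.Chars.strip ('<' :: (body ++ ['>'])) = '<' :: (body ++ ['>']) :=
            strip_sandwich (by decide) (by decide)
          have step : tokStepA (tokens, '<' :: body, true) '>' =
              (tokens ++ [String.ofList (PySem.Chars.strip (('<' :: body) ++ ['>']))],
                [], false) := by
            simp [tokStepA]
          rw [step, ihW _ [] (by simp), contNT_gt]
          simp [hsand]
        · -- ordinary char inside the non-terminal (space, *, + included)
          have hnt : tokNtPred c = true := by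
            simp [tokNtPred, hlt, hgt]
          have step : tokStepA (tokens, '<' :: body, true) c =
              (tokens, ('<' :: body) ++ [c], true) := by
            simp [tokStepA, hlt, hgt]
          have hbody' : ∀ d ∈ body ++ [c], tokNtPred d = true := by
            intro d hd
            rcases List.mem_append.1 hd with hd | hd
            · exact hbody d hd
            · simp at hd; subst hd; exact hnt
          rw [step]
          have : ('<' :: body) ++ [c] = '<' :: (body ++ [c]) := by simp
          rw [this, ihN _ _ hbody', contNT_nt hnt]
          simp

-- ===== VERDICT (by name: the statement is the Claim_ definition above) =====
theorem tokenize_alternative_py_spec : Claim_equal_tokenize_alternative_py := by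
  intro alternative _
  unfold Spec_tokenize_alternative_py tokenize_alternative_py tokenize_alternative_py_alt
  have h := (foldA_spec alternative.toList).1 [] [] (by simp)
  simpa using h
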